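-- pv_equiv track=rewrite | github.com/yutake27/Atcoder | atc/001/a.py | dfs
-- ===== SOURCE A (Python) =====
-- from collections import deque
--
-- def dfs(h, w, sh, sw, gh, gw, c):
--     num = 0
--     queue = deque([[sh, sw]])
--     visited = [[-1] * w for _ in range(h)]
--     visited[sh][sw] = -1
--     while queue:
--         y, x = queue.pop()
--         if visited[y][x] != -1:
--             continue
--         else:
--             num += 1
--             visited[y][x] = num
--
--         if [y, x] == [gh, gw]:
--             return num
--
--         for i, j in [[1, 0], [-1, 0], [0, 1], [0, -1]]:
--             ny = y + i
--             nx = x + j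
--             if (0 <= nx < w) and (0<= ny < h) and visited[ny][nx] == -1 and c[ny][nx] != '#':
--                 queue.append([ny, nx])
--     return -1
-- ===== SOURCE B (Python) =====
-- def dfs(h, w, sh, sw, gh, gw, c):
--     visited = [[-1] * w for _ in range(h)]
--     count = 0
--
--     # Recursive DFS: enter a cell, stamp it with the next count, return the
--     # count as soon as the goal is entered, otherwise recurse into unvisited
--     # open neighbours (left, right, up, down) and propagate a hit upward.
--     # Written as a generator so the trampoline below can run the recursion
--     # without touching Python's call-stack limit.
--     def go(y, x):
--         nonlocal count
--         if visited[y][x] != -1: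
--             yield ('ret', None)
--             return
--         count += 1
--         visited[y][x] = count
--         if y == gh and x == gw:
--             yield ('ret', count)
--             return
--         for ny, nx in ((y, x - 1), (y, x + 1), (y - 1, x), (y + 1, x)):
--             if 0 <= nx < w and 0 <= ny < h and visited[ny][nx] == -1 and c[ny][nx] != '#':
--                 res = yield ('call', go(ny, nx))
--                 if res is not None:
--                     yield ('ret', res)
--                     return
--         yield ('ret', None)
--
--     # trampoline driving the recursion
--     frames = [go(sh, sw)]
--     sent = None
--     while frames:
--         tag, val = frames[-1].send(sent)
--         sent = None
--         if tag == 'call':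
--             frames.append(val)
--         else:
--             frames.pop()
--             sent = val
--     return sent if sent is not None else -1
-- ===== Notes on version B (the rewrite author's own statement) =====
-- stated objective: alternative
-- what changed: Replaces the iterative deque-of-candidate-cells DFS (push all four raw neighbours, re-check visited on pop) by a recursive DFS that stamps a cell on entry, recurses into unvisited open neighbours in the reversed priority order (left, right, up, down) and propagates the goal count upward, run by a generator trampoline so deep grids need no call stack.
-- outside the precondition, e.g. on dfs(1, 3, 0, 0, 2, 2, ['##']): A returns -1, B returns -1; on dfs(2, 6, -1, 0, 2, 2, ['#c', 'ac90aayaazx']): A returns -1, B returns -1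
import Mathlib
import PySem

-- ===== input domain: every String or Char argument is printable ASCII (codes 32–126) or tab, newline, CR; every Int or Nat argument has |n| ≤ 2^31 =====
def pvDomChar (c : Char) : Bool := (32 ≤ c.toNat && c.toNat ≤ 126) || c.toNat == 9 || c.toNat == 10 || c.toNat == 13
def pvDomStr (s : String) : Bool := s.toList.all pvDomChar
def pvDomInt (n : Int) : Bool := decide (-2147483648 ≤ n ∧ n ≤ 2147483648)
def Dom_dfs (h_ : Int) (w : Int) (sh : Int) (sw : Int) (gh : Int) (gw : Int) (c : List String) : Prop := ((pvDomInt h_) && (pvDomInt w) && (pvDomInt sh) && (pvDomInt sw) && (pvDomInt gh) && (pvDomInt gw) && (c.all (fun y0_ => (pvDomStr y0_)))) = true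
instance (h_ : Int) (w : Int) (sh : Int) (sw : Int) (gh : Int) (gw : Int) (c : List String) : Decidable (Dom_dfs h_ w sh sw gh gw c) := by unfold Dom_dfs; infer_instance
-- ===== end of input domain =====

-- B replaces A's deque-of-candidate-cells DFS (push all four raw neighbours, re-check
-- `visited` on pop) by a recursive DFS stamping each cell on entry and propagating the
-- goal count upward (run by a generator trampoline in Python); same values, same cost.

-- ===== PORT A =====
-- shared primitive accesses (both Pythons read/write `visited` and `c` the same way)

-- visited[y][x] read (Python list-of-lists indexing; none = IndexError)
def vget (v : List (List Int)) (y x : Int) : Option Int :=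
  match PySem.List.pyGet? v y with
  | none => none
  | some row => PySem.List.pyGet? row x

-- visited[y][x] = a  (total form: out-of-range = IndexError in Python, outside Pre_)
def vset (v : List (List Int)) (y x : Int) (a : Int) : List (List Int) :=
  match PySem.List.pyGet? v y with
  | none => v
  | some row => PySem.List.pySetD v y (PySem.List.pySetD row x a)

-- c[y][x] read (none = IndexError in Python, outside Pre_)
def cget (c : List String) (y x : Int) : Option Char :=
  match PySem.List.pyGet? c y with
  | none => none
  | some row => PySem.Str.pyGet? row x

-- the neighbour test `0 <= nx < w and 0 <= ny < h and visited[ny][nx] == -1 and c[ny][nx] != '#'`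
-- (textually identical in both Pythons; a missing character = IndexError, outside Pre_)
def nbrOk (h_ w : Int) (c : List String) (v : List (List Int)) (ny nx : Int) : Bool :=
  decide (0 ≤ nx ∧ nx < w) && decide (0 ≤ ny ∧ ny < h_) &&
    (vget v ny nx == some (-1)) && ((cget c ny nx).getD '#' != '#')

-- number of still-unvisited entries: the termination measure of A's loop
def countNeg (v : List (List Int)) : Nat :=
  (v.map (fun r => r.countP (fun a => a == -1))).sum

-- termination lemmas for the ports (cited by decreasing_by / the fuel bound)
lemma getResolve {α : Type} (xs : List α) (i : Int) (b : α)
    (h : PySem.List.pyGet? xs i = some b) :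
    ∃ k : Nat, xs[k]? = some b ∧ ∀ a : α, PySem.List.pySetD xs i a = xs.set k a := by
  unfold PySem.List.pyGet? at h
  cases hk : PySem.List.pyIdx? xs.length i with
  | none => rw [hk] at h; simp at h
  | some k =>
    rw [hk] at h; simp at h
    exact ⟨k, h, fun a => by simp [PySem.List.pySetD, PySem.List.pySet?, hk]⟩

lemma vset_resolve (v : List (List Int)) (y x : Int) (t : Int)
    (hv : vget v y x = some t) :
    ∃ (k m : Nat) (r : List Int), v[k]? = some r ∧ r[m]? = some t ∧
      ∀ a, vset v y x a = v.set k (r.set m a) := by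
  unfold vget at hv
  cases hr : PySem.List.pyGet? v y with
  | none => rw [hr] at hv; cases hv
  | some row =>
    rw [hr] at hv; simp only at hv
    obtain ⟨k, hk, hset⟩ := getResolve v y row hr
    obtain ⟨m, hm, hmset⟩ := getResolve row x t hv
    refine ⟨k, m, row, hk, hm, fun a => ?_⟩
    simp only [vset, hr]
    rw [hmset a, hset _]

lemma countP_set_lt (r : List Int) (m : Nat) (a : Int)
    (hm : r[m]? = some (-1)) (ha : a ≠ -1) :
    (r.set m a).countP (fun z => z == -1) < r.countP (fun z => z == -1) := by
  induction r generalizing m with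
  | nil => simp at hm
  | cons b r ih =>
    cases m with
    | zero =>
      simp at hm; subst hm
      simp [List.set, ha]
    | succ m =>
      simp at hm
      have := ih m hm
      simp [List.set, List.countP_cons]
      omega

lemma countNeg_set_add (v : List (List Int)) (n : Nat) (r r' : List Int)
    (hn : v[n]? = some r) :
    countNeg (v.set n r') + r.countP (fun z => z == -1)
      = countNeg v + r'.countP (fun z => z == -1) := by
  induction v generalizing n with
  | nil => simp at hn
  | cons s v ih =>
    cases n with
    | zero => simp at hn; subst hn; simp [countNeg, List.set]; omega
    | succ n =>
      simp at hn
      have := ih n hn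
      simp [countNeg, List.set] at *
      omega

lemma countNeg_vset_lt (v : List (List Int)) (y x a : Int)
    (hv : vget v y x = some (-1)) (ha : a ≠ -1) :
    countNeg (vset v y x a) < countNeg v := by
  obtain ⟨k, m, r, hk, hm, hset⟩ := vset_resolve v y x _ hv
  rw [hset a]
  have h1 := countP_set_lt r m a hm ha
  have h2 := countNeg_set_add v k r (r.set m a) hk
  omega

-- A's while-loop; the stack top is the list head (deque.append/pop work at the right end,
-- so pushing [down, up, right, left] puts left on top: `.reverse ++ rest`).
-- `num` only ever counts up from 0, so it is carried as a Nat and returned as Int.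
def dfsLoop (h_ w gh gw : Int) (c : List String) :
    List (Int × Int) → List (List Int) → Nat → Int
  | [], _, _ => -1
  | (y, x) :: rest, v, num =>
    match hv : vget v y x with
    | none => 0   -- visited[y][x] raises IndexError in Python: outside Pre_
    | some t =>
      if t ≠ -1 then dfsLoop h_ w gh gw c rest v num
      else
        let v' := vset v y x ((num : Int) + 1)
        if y = gh ∧ x = gw then (num : Int) + 1
        else
          dfsLoop h_ w gh gw c
            (((([((1:Int),(0:Int)), (-1,0), (0,1), (0,-1)].map
                  (fun d => (y + d.1, x + d.2))).filter
                    (fun p => nbrOk h_ w c v' p.1 p.2)).reverse) ++ rest)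
            v' (num + 1)
termination_by stack v _ => 5 * countNeg v + stack.length
decreasing_by
  all_goals simp only [List.length_cons, List.length_append, List.length_reverse]
  · omega
  · have ht : t = -1 := by omega
    have hlt : countNeg (vset v y x ((num : Int) + 1)) < countNeg v :=
      countNeg_vset_lt v y x ((num : Int) + 1) (ht ▸ hv) (by omega)
    have hlen : (([((1:Int),(0:Int)), (-1,0), (0,1), (0,-1)].map
        (fun d => (y + d.1, x + d.2))).filter
          (fun p => nbrOk h_ w c (vset v y x ((num : Int) + 1)) p.1 p.2)).length ≤ 4 :=
      le_trans (List.length_filter_le _ _) (by simp)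
    omega

def dfs (h_ : Int) (w : Int) (sh : Int) (sw : Int) (gh : Int) (gw : Int) (c : List String) : Int :=
  let visited := List.replicate h_.toNat (List.replicate w.toNat (-1 : Int))
  let visited := vset visited sh sw (-1)   -- `visited[sh][sw] = -1` (a no-op write, kept from A)
  dfsLoop h_ w gh gw c [(sh, sw)] visited 0

-- ===== PORT B =====
-- B's recursion `go` (the Python trampoline only runs this recursion without a call
-- stack). `fuel` is a totality device only: each nested call strictly decreases the
-- number of unvisited cells, and dfs_alt hands it h*w+1, more than can ever be used.
mutual
def visit (h_ w gh gw : Int) (c : List String) :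
    Nat → Int → Int → List (List Int) → Nat → (Option Int × List (List Int) × Nat)
  | 0, _, _, v, num => (none, v, num)   -- unreachable: fuel exceeds the number of cells
  | fuel + 1, y, x, v, num =>
    match vget v y x with
    | none => (none, v, num)   -- visited[y][x] raises IndexError in Python: outside Pre_
    | some t =>
      if t ≠ -1 then (none, v, num)
      else
        let v' := vset v y x ((num : Int) + 1)
        if y = gh ∧ x = gw then (some ((num : Int) + 1), v', num + 1)
        else visitFold h_ w gh gw c fuel [(y, x - 1), (y, x + 1), (y - 1, x), (y + 1, x)] v' (num + 1)
termination_by fuel _ _ _ _ => 10 * fuel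
decreasing_by simp only [List.length_cons, List.length_nil]; omega

-- `for ny, nx in ((y,x-1),(y,x+1),(y-1,x),(y+1,x)): …` with early return on a hit
def visitFold (h_ w gh gw : Int) (c : List String) :
    Nat → List (Int × Int) → List (List Int) → Nat → (Option Int × List (List Int) × Nat)
  | _, [], v, num => (none, v, num)
  | fuel, (ny, nx) :: rest, v, num =>
    if nbrOk h_ w c v ny nx then
      match visit h_ w gh gw c fuel ny nx v num with
      | (some r, v₂, n₂) => (some r, v₂, n₂)
      | (none, v₂, n₂) => visitFold h_ w gh gw c fuel rest v₂ n₂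
    else visitFold h_ w gh gw c fuel rest v num
termination_by fuel l _ _ => 10 * fuel + l.length + 1
decreasing_by
  all_goals simp only [List.length_cons]
  all_goals omega
end

def dfs_alt (h_ : Int) (w : Int) (sh : Int) (sw : Int) (gh : Int) (gw : Int) (c : List String) : Int :=
  let visited := List.replicate h_.toNat (List.replicate w.toNat (-1 : Int))
  match visit h_ w gh gw c (h_.toNat * w.toNat + 1) sh sw visited 0 with
  | (some r, _, _) => r
  | (none, _, _) => -1

-- ===== PRECONDITION & SPEC =====
-- Pre_ keeps the closed-form inputs on which A completes without reading past `c`: a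
-- well-formed h×w grid, or a start whose search provably ends before any grid read (the
-- goal itself, or a wrapped/degenerate start with no in-bounds unvisited neighbour); it
-- excludes the remaining undersized-grid inputs, where A raises IndexError as soon as a
-- cell of the missing part is inspected (on the few that stop earlier behind walls both
-- programs return the same value anyway).
def Pre_dfs (h_ : Int) (w : Int) (sh : Int) (sw : Int) (gh : Int) (gw : Int) (c : List String) : Prop :=
  (-h_ ≤ sh ∧ sh < h_) ∧ (-w ≤ sw ∧ sw < w) ∧
    ((sh = gh ∧ sw = gw) ∨ sh ≤ -2 ∨ sw ≤ -2 ∨ (sh = -1 ∧ h_ = 1) ∨ (sw = -1 ∧ w = 1) ∨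
      (h_ = 1 ∧ w = 1) ∨
      (h_ ≤ (c.length : Int) ∧ ∀ s ∈ c.take h_.toNat, w ≤ (s.length : Int)))
instance (h_ : Int) (w : Int) (sh : Int) (sw : Int) (gh : Int) (gw : Int) (c : List String) : Decidable (Pre_dfs h_ w sh sw gh gw c) := by unfold Pre_dfs; infer_instance

def pvWitness_dfs : Int × Int × Int × Int × Int × Int × List String := (2, 2, 0, 0, 1, 1, ["..", ".."])

def Spec_dfs (h_ : Int) (w : Int) (sh : Int) (sw : Int) (gh : Int) (gw : Int) (c : List String) (out : Int) : Prop := out = dfs_alt h_ w sh sw gh gw c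
instance (h_ : Int) (w : Int) (sh : Int) (sw : Int) (gh : Int) (gw : Int) (c : List String) (out : Int) : Decidable (Spec_dfs h_ w sh sw gh gw c out) := by unfold Spec_dfs; infer_instance

-- ===== CLAIM (what is proved, stated in full; the proofs are below) =====
def Claim_equal_dfs : Prop := ∀ (h_ : Int) (w : Int) (sh : Int) (sw : Int) (gh : Int) (gw : Int) (c : List String), Dom_dfs h_ w sh sw gh gw c → Pre_dfs h_ w sh sw gh gw c → Spec_dfs h_ w sh sw gh gw c (dfs h_ w sh sw gh gw c)

-- ===== LEMMAS AND PROOFS =====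

-- shape of the visited matrix, cell reads with Nat indices, and monotonicity
def Sh (h_ w : Int) (v : List (List Int)) : Prop :=
  v.length = h_.toNat ∧ ∀ r ∈ v, r.length = w.toNat

def cellD (v : List (List Int)) (n m : Nat) : Int := (v.getD n []).getD m (-1)

def VExt (v v' : List (List Int)) : Prop :=
  ∀ n m : Nat, cellD v n m ≠ -1 → cellD v' n m ≠ -1

lemma VExt_rfl (v : List (List Int)) : VExt v v := fun _ _ h => h

lemma VExt_trans {u v w : List (List Int)} (h1 : VExt u v) (h2 : VExt v w) : VExt u w :=
  fun n m h => h2 n m (h1 n m h)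

def StepOK (h_ w : Int) (v v₂ : List (List Int)) : Prop :=
  (Sh h_ w v → Sh h_ w v₂) ∧ countNeg v₂ ≤ countNeg v ∧ VExt v v₂

lemma StepOK_rfl (h_ w : Int) (v : List (List Int)) : StepOK h_ w v v :=
  ⟨id, le_refl _, VExt_rfl v⟩

lemma StepOK_trans {h_ w : Int} {u v w' : List (List Int)}
    (h1 : StepOK h_ w u v) (h2 : StepOK h_ w v w') : StepOK h_ w u w' :=
  ⟨fun h => h2.1 (h1.1 h), le_trans h2.2.1 h1.2.1, VExt_trans h1.2.2 h2.2.2⟩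

lemma vget_cell (h_ w : Int) (v : List (List Int)) (y x : Int) (hsh : Sh h_ w v)
    (hy : 0 ≤ y) (hy2 : y < h_) (hx : 0 ≤ x) (hx2 : x < w) :
    vget v y x = some (cellD v y.toNat x.toNat) := by
  obtain ⟨hl, hrows⟩ := hsh
  have hyl : y.toNat < v.length := by omega
  have hxl : x.toNat < (v[y.toNat]).length := by
    rw [hrows _ (List.getElem_mem hyl)]; omega
  unfold vget
  rw [PySem.List.pyGet?_of_nonneg _ hy, List.getElem?_eq_getElem hyl]
  simp only
  rw [PySem.List.pyGet?_of_nonneg _ hx, List.getElem?_eq_getElem hxl]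
  unfold cellD
  have hrowD : v.getD y.toNat [] = v[y.toNat] := by
    rw [List.getD_eq_getElem?_getD, List.getElem?_eq_getElem hyl]; rfl
  rw [hrowD, List.getD_eq_getElem?_getD, List.getElem?_eq_getElem hxl]; rfl

lemma cellD_set (v : List (List Int)) (k : Nat) (r : List Int) (hk : v[k]? = some r)
    (m : Nat) (a : Int) (n m' : Nat) :
    cellD (v.set k (r.set m a)) n m'
      = if n = k ∧ m' = m ∧ m < r.length then a else cellD v n m' := by
  have hkl : k < v.length := (List.getElem?_eq_some_iff.mp hk).1
  simp only [cellD, List.getD_eq_getElem?_getD, List.getElem?_set]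
  by_cases hn : n = k
  · subst hn
    simp only [if_pos hkl, hk, Option.getD_some, true_and, if_true]
    rw [List.getElem?_set]
    by_cases hm' : m = m'
    · subst hm'
      by_cases hm : m < r.length <;> simp [hm]
    · rw [if_neg hm', if_neg (by omega : ¬ (m' = m ∧ m < r.length))]
  · have hkn : ¬ k = n := fun h => hn h.symm
    rw [if_neg hkn, if_neg (by omega : ¬ (n = k ∧ m' = m ∧ m < r.length))]

lemma Sh_vset {h_ w : Int} {v : List (List Int)} {y x t : Int} (hsh : Sh h_ w v)
    (hv : vget v y x = some t) (a : Int) : Sh h_ w (vset v y x a) := by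
  obtain ⟨k, m, r, hk, hm, hset⟩ := vset_resolve v y x t hv
  rw [hset a]
  refine ⟨by simpa using hsh.1, ?_⟩
  intro r' hr'
  rcases List.mem_or_eq_of_mem_set hr' with h | h
  · exact hsh.2 _ h
  · subst h
    simpa using hsh.2 r ((List.getElem?_eq_some_iff.mp hk).2 ▸
      List.getElem_mem (List.getElem?_eq_some_iff.mp hk).1)

lemma Ext_vset {v : List (List Int)} {y x t a : Int}
    (hv : vget v y x = some t) (ha : a ≠ -1) : VExt v (vset v y x a) := by
  obtain ⟨k, m, r, hk, hm, hset⟩ := vset_resolve v y x t hv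
  rw [hset a]
  intro n m' h
  rw [cellD_set v k r hk m a n m']
  split_ifs with hif
  · exact ha
  · exact h

lemma StepOK_vset {h_ w : Int} {v : List (List Int)} {y x a : Int}
    (hv : vget v y x = some (-1)) (ha : a ≠ -1) : StepOK h_ w v (vset v y x a) :=
  ⟨fun hsh => Sh_vset hsh hv a, le_of_lt (countNeg_vset_lt v y x a hv ha), Ext_vset hv ha⟩

lemma visitFold_mono_of (h_ w gh gw : Int) (c : List String) (fuel : Nat)
    (hvisit : ∀ y x v num, StepOK h_ w v (visit h_ w gh gw c fuel y x v num).2.1) :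
    ∀ (l : List (Int × Int)) (v : List (List Int)) (num : Nat),
      StepOK h_ w v (visitFold h_ w gh gw c fuel l v num).2.1 := by
  intro l
  induction l with
  | nil => intro v num; rw [visitFold]; exact StepOK_rfl h_ w v
  | cons p l ih =>
    intro v num
    obtain ⟨ny, nx⟩ := p
    rw [visitFold]
    by_cases hok : nbrOk h_ w c v ny nx
    · rw [if_pos hok]
      rcases hres : visit h_ w gh gw c fuel ny nx v num with ⟨r, v₂, n₂⟩
      have h1 : StepOK h_ w v v₂ := by
        have := hvisit ny nx v num; rw [hres] at this; exact this
      cases r with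
      | some k => exact h1
      | none => exact StepOK_trans h1 (ih v₂ n₂)
    · rw [if_neg hok]; exact ih v num

lemma visit_mono (h_ w gh gw : Int) (c : List String) :
    ∀ (fuel : Nat) (y x : Int) (v : List (List Int)) (num : Nat),
      StepOK h_ w v (visit h_ w gh gw c fuel y x v num).2.1 := by
  intro fuel
  induction fuel with
  | zero => intro y x v num; rw [visit]; exact StepOK_rfl h_ w v
  | succ fuel ih =>
    intro y x v num
    rw [visit]
    cases hv : vget v y x with
    | none => exact StepOK_rfl h_ w v
    | some t =>
      simp only
      by_cases ht : t ≠ -1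
      · rw [if_pos ht]; exact StepOK_rfl h_ w v
      · rw [if_neg ht]
        rw [not_not] at ht
        subst ht
        have h1 : StepOK h_ w v (vset v y x ((num : Int) + 1)) :=
          StepOK_vset hv (by omega)
        by_cases hgoal : y = gh ∧ x = gw
        · rw [if_pos hgoal]; exact h1
        · rw [if_neg hgoal]
          exact StepOK_trans h1 (visitFold_mono_of h_ w gh gw c fuel ih _ _ _)

lemma nbrOk_true_elim {h_ w : Int} {c : List String} {v : List (List Int)} {y x : Int}
    (h : nbrOk h_ w c v y x = true) :
    (0 ≤ x ∧ x < w) ∧ (0 ≤ y ∧ y < h_) ∧ ((cget c y x).getD '#' != '#') = true := by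
  simp only [nbrOk, Bool.and_eq_true, decide_eq_true_eq] at h
  exact ⟨h.1.1.1, h.1.1.2, h.2⟩

lemma nbrOk_eval {h_ w : Int} (c : List String) (v : List (List Int)) {y x : Int}
    (hb1 : 0 ≤ x ∧ x < w) (hb2 : 0 ≤ y ∧ y < h_)
    (hc : ((cget c y x).getD '#' != '#') = true) :
    nbrOk h_ w c v y x = (vget v y x == some (-1)) := by
  simp [nbrOk, hb1, hb2, hc]

lemma nbrOk_false_transfer {h_ w : Int} {c : List String} {v0 v : List (List Int)} {y x : Int}
    (hsh0 : Sh h_ w v0) (hsh : Sh h_ w v) (hext : VExt v0 v)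
    (hf : nbrOk h_ w c v0 y x = false) : nbrOk h_ w c v y x = false := by
  by_cases hb1 : 0 ≤ x ∧ x < w
  · by_cases hb2 : 0 ≤ y ∧ y < h_
    · by_cases hc : ((cget c y x).getD '#' != '#') = true
      · rw [nbrOk_eval c v0 hb1 hb2 hc] at hf
        rw [nbrOk_eval c v hb1 hb2 hc]
        rw [vget_cell h_ w v0 y x hsh0 hb2.1 hb2.2 hb1.1 hb1.2] at hf
        simp only [beq_eq_false_iff_ne, ne_eq, Option.some.injEq] at hf
        have := hext _ _ hf
        rw [vget_cell h_ w v y x hsh hb2.1 hb2.2 hb1.1 hb1.2]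
        simpa using this
      · simp only [Bool.not_eq_true] at hc
        simp [nbrOk, hc]
    · simp [nbrOk, hb2]
  · simp [nbrOk, hb1]

lemma filter4_rev {α : Type} (P : α → Bool) (a b c d : α) :
    ([a, b, c, d].filter P).reverse = [d, c, b, a].filter P := by
  simp only [List.filter_cons, List.filter_nil]
  cases hPa : P a <;> cases hPb : P b <;> cases hPc : P c <;> cases hPd : P d <;> simp

lemma stackA (P : Int × Int → Bool) (y x : Int) :
    (([((1:Int),(0:Int)), (-1,0), (0,1), (0,-1)].map
        (fun d => (y + d.1, x + d.2))).filter P).reverse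
      = [(y, x - 1), (y, x + 1), (y - 1, x), (y + 1, x)].filter P := by
  have e : ([((1:Int),(0:Int)), (-1,0), (0,1), (0,-1)].map (fun d => (y + d.1, x + d.2)))
      = [(y + 1, x), (y - 1, x), (y, x + 1), (y, x - 1)] := by
    simp only [List.map_cons, List.map_nil, add_zero]
    norm_num [sub_eq_add_neg]
  rw [e, filter4_rev]

-- directed unfolding equations for the two machines
lemma dfsLoop_nil (h_ w gh gw : Int) (c : List String) (v : List (List Int)) (num : Nat) :
    dfsLoop h_ w gh gw c [] v num = -1 := by rw [dfsLoop]

lemma dfsLoop_skip (h_ w gh gw : Int) (c : List String) (v : List (List Int)) (num : Nat)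
    (y x t : Int) (rest : List (Int × Int)) (hv : vget v y x = some t) (ht : t ≠ -1) :
    dfsLoop h_ w gh gw c ((y, x) :: rest) v num = dfsLoop h_ w gh gw c rest v num := by
  rw [dfsLoop]
  split
  · rename_i h; rw [hv] at h; cases h
  · rename_i t' h; rw [hv] at h; injection h with h; subst h
    rw [if_pos ht]

lemma dfsLoop_goal (h_ w gh gw : Int) (c : List String) (v : List (List Int)) (num : Nat)
    (y x : Int) (rest : List (Int × Int)) (hv : vget v y x = some (-1)) (hg : y = gh ∧ x = gw) :
    dfsLoop h_ w gh gw c ((y, x) :: rest) v num = (num : Int) + 1 := by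
  rw [dfsLoop]
  split
  · rename_i h; rw [hv] at h; cases h
  · rename_i t' h; rw [hv] at h; injection h with h; subst h
    rw [if_neg (by simp), if_pos hg]

lemma dfsLoop_push (h_ w gh gw : Int) (c : List String) (v : List (List Int)) (num : Nat)
    (y x : Int) (rest : List (Int × Int)) (hv : vget v y x = some (-1)) (hg : ¬(y = gh ∧ x = gw)) :
    dfsLoop h_ w gh gw c ((y, x) :: rest) v num =
      dfsLoop h_ w gh gw c
        (((([((1:Int),(0:Int)), (-1,0), (0,1), (0,-1)].map (fun d => (y + d.1, x + d.2))).filter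
          (fun p => nbrOk h_ w c (vset v y x ((num : Int) + 1)) p.1 p.2)).reverse) ++ rest)
        (vset v y x ((num : Int) + 1)) (num + 1) := by
  rw [dfsLoop]
  split
  · rename_i h; rw [hv] at h; cases h
  · rename_i t' h; rw [hv] at h; injection h with h; subst h
    rw [if_neg (by simp), if_neg hg]

lemma visit_goal (h_ w gh gw : Int) (c : List String) (v : List (List Int)) (num fuel : Nat)
    (y x : Int) (hv : vget v y x = some (-1)) (hg : y = gh ∧ x = gw) :
    visit h_ w gh gw c (fuel + 1) y x v num
      = (some ((num : Int) + 1), vset v y x ((num : Int) + 1), num + 1) := by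
  rw [visit, hv]
  simp only
  rw [if_neg (by simp), if_pos hg]

lemma visit_push (h_ w gh gw : Int) (c : List String) (v : List (List Int)) (num fuel : Nat)
    (y x : Int) (hv : vget v y x = some (-1)) (hg : ¬(y = gh ∧ x = gw)) :
    visit h_ w gh gw c (fuel + 1) y x v num
      = visitFold h_ w gh gw c fuel [(y, x - 1), (y, x + 1), (y - 1, x), (y + 1, x)]
          (vset v y x ((num : Int) + 1)) (num + 1) := by
  rw [visit, hv]
  simp only
  rw [if_neg (by simp), if_neg hg]

lemma visitFold_nil (h_ w gh gw : Int) (c : List String) (fuel : Nat)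
    (v : List (List Int)) (num : Nat) :
    visitFold h_ w gh gw c fuel [] v num = (none, v, num) := by rw [visitFold]

lemma visitFold_skip (h_ w gh gw : Int) (c : List String) (fuel : Nat) (ny nx : Int)
    (rest : List (Int × Int)) (v : List (List Int)) (num : Nat)
    (hok : nbrOk h_ w c v ny nx = false) :
    visitFold h_ w gh gw c fuel ((ny, nx) :: rest) v num
      = visitFold h_ w gh gw c fuel rest v num := by
  rw [visitFold, if_neg (by simp [hok])]

lemma visitFold_enter (h_ w gh gw : Int) (c : List String) (fuel : Nat) (ny nx : Int)
    (rest : List (Int × Int)) (v : List (List Int)) (num : Nat)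
    (hok : nbrOk h_ w c v ny nx = true) :
    visitFold h_ w gh gw c fuel ((ny, nx) :: rest) v num
      = (match visit h_ w gh gw c fuel ny nx v num with
         | (some r, v₂, n₂) => (some r, v₂, n₂)
         | (none, v₂, n₂) => visitFold h_ w gh gw c fuel rest v₂ n₂) := by
  rw [visitFold, if_pos hok]

-- the heart: A's stack loop, run on the (push-time-filtered) neighbour candidates,
-- computes exactly what B's recursion computes on the raw candidates
lemma main (h_ w gh gw : Int) (c : List String) :
    ∀ (μ fuel : Nat) (l rest : List (Int × Int)) (v0 v : List (List Int)) (num : Nat),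
      Sh h_ w v0 → Sh h_ w v → VExt v0 v → countNeg v < fuel →
      5 * countNeg v + l.length ≤ μ →
      dfsLoop h_ w gh gw c (l.filter (fun p => nbrOk h_ w c v0 p.1 p.2) ++ rest) v num =
        (match visitFold h_ w gh gw c fuel l v num with
         | (some k, _, _) => k
         | (none, v₂, n₂) => dfsLoop h_ w gh gw c rest v₂ n₂) := by
  intro μ
  induction μ with
  | zero =>
    intro fuel l rest v0 v num hsh0 hsh hext hfuel hμ
    have hl : l = [] := by
      cases l with
      | nil => rfl
      | cons p l' => simp [List.length_cons] at hμ
    subst hl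
    rw [visitFold_nil]
    simp only [List.filter_nil, List.nil_append]
  | succ μ ih =>
    intro fuel l rest v0 v num hsh0 hsh hext hfuel hμ
    cases l with
    | nil =>
      rw [visitFold_nil]
      simp only [List.filter_nil, List.nil_append]
    | cons p l' =>
      obtain ⟨y, x⟩ := p
      simp only [List.length_cons] at hμ
      by_cases hok : nbrOk h_ w c v0 y x = true
      case neg =>
        have hok0 : nbrOk h_ w c v0 y x = false := by simpa using hok
        have hokv : nbrOk h_ w c v y x = false := nbrOk_false_transfer hsh0 hsh hext hok0
        simp only [List.filter_cons, hok0, Bool.false_eq_true, if_false]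
        rw [visitFold_skip h_ w gh gw c fuel y x l' v num hokv]
        exact ih fuel l' rest v0 v num hsh0 hsh hext hfuel (by omega)
      case pos =>
        obtain ⟨hb1, hb2, hc⟩ := nbrOk_true_elim hok
        have hvg : vget v y x = some (cellD v y.toNat x.toNat) :=
          vget_cell h_ w v y x hsh hb2.1 hb2.2 hb1.1 hb1.2
        simp only [List.filter_cons, hok, if_true]
        rw [List.cons_append]
        by_cases ht : cellD v y.toNat x.toNat = -1
        case neg =>
          -- already visited when popped: both machines skip the cell
          have hokv : nbrOk h_ w c v y x = false := by
            rw [nbrOk_eval c v hb1 hb2 hc, hvg]; simp [ht]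
          rw [dfsLoop_skip h_ w gh gw c v num y x _ _ hvg ht]
          rw [visitFold_skip h_ w gh gw c fuel y x l' v num hokv]
          exact ih fuel l' rest v0 v num hsh0 hsh hext hfuel (by omega)
        case pos =>
          rw [ht] at hvg
          cases fuel with
          | zero => omega
          | succ f =>
            have hokv : nbrOk h_ w c v y x = true := by
              rw [nbrOk_eval c v hb1 hb2 hc, hvg]; simp
            rw [visitFold_enter h_ w gh gw c (f + 1) y x l' v num hokv]
            by_cases hgoal : y = gh ∧ x = gw
            · rw [dfsLoop_goal h_ w gh gw c v num y x _ hvg hgoal]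
              rw [visit_goal h_ w gh gw c v num f y x hvg hgoal]
            · rw [dfsLoop_push h_ w gh gw c v num y x _ hvg hgoal]
              rw [visit_push h_ w gh gw c v num f y x hvg hgoal]
              have hsok : StepOK h_ w v (vset v y x ((num : Int) + 1)) :=
                StepOK_vset hvg (by omega)
              have hsh' : Sh h_ w (vset v y x ((num : Int) + 1)) := hsok.1 hsh
              have hcn : countNeg (vset v y x ((num : Int) + 1)) < countNeg v :=
                countNeg_vset_lt v y x _ hvg (by omega)
              rw [stackA]
              rw [ih f [(y, x - 1), (y, x + 1), (y - 1, x), (y + 1, x)]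
                (l'.filter (fun p => nbrOk h_ w c v0 p.1 p.2) ++ rest)
                (vset v y x ((num : Int) + 1)) (vset v y x ((num : Int) + 1)) (num + 1)
                hsh' hsh' (VExt_rfl _) (by omega) (by simp [List.length_cons]; omega)]
              rcases hres : visitFold h_ w gh gw c f [(y, x - 1), (y, x + 1), (y - 1, x), (y + 1, x)]
                  (vset v y x ((num : Int) + 1)) (num + 1) with ⟨r, v₂, n₂⟩
              have hstep : StepOK h_ w (vset v y x ((num : Int) + 1)) v₂ := by
                have h := visitFold_mono_of h_ w gh gw c f (visit_mono h_ w gh gw c f)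
                  [(y, x - 1), (y, x + 1), (y - 1, x), (y + 1, x)]
                  (vset v y x ((num : Int) + 1)) (num + 1)
                rw [hres] at h; exact h
              cases r with
              | some k => simp only
              | none =>
                simp only
                have h21 := hstep.2.1
                exact ih (f + 1) l' rest v0 v₂ n₂ hsh0 (hstep.1 hsh')
                  (VExt_trans hext (VExt_trans hsok.2.2 hstep.2.2)) (by omega) (by omega)

-- facts about the freshly built visited matrix
lemma vset_start (n m : Nat) (y x : Int) :
    vset (List.replicate n (List.replicate m (-1 : Int))) y x (-1)
      = List.replicate n (List.replicate m (-1 : Int)) := by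
  unfold vset
  cases hr : PySem.List.pyGet? (List.replicate n (List.replicate m (-1 : Int))) y with
  | none => rfl
  | some row =>
    simp only
    have hrow : row = List.replicate m (-1) :=
      List.eq_of_mem_replicate (PySem.List.mem_of_pyGet?_eq_some _ hr)
    subst hrow
    have h1 : PySem.List.pySetD (List.replicate m (-1 : Int)) x (-1)
        = List.replicate m (-1 : Int) := by
      unfold PySem.List.pySetD PySem.List.pySet?
      cases hk : PySem.List.pyIdx? (List.replicate m (-1 : Int)).length x with
      | none => rfl
      | some k => simp
    rw [h1]
    unfold PySem.List.pySetD PySem.List.pySet?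
    cases hk : PySem.List.pyIdx? (List.replicate n (List.replicate m (-1 : Int))).length y with
    | none => rfl
    | some k => simp

lemma countP_neg_replicate (m : Nat) :
    (List.replicate m (-1 : Int)).countP (fun z => z == -1) = m := by
  induction m with
  | zero => simp
  | succ m ih => simp [List.replicate_succ, ih]

lemma countNeg_replicate (n m : Nat) :
    countNeg (List.replicate n (List.replicate m (-1 : Int))) = n * m := by
  unfold countNeg
  rw [List.map_replicate, countP_neg_replicate, List.sum_replicate]
  simp

lemma Sh_replicate (h_ w : Int) :
    Sh h_ w (List.replicate h_.toNat (List.replicate w.toNat (-1 : Int))) :=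
  ⟨by simp, fun r hr => by rw [List.eq_of_mem_replicate hr]; simp⟩

lemma vget_replicate (n m : Nat) (y x : Int)
    (hy : -(n : Int) ≤ y ∧ y < n) (hx : -(m : Int) ≤ x ∧ x < m) :
    vget (List.replicate n (List.replicate m (-1 : Int))) y x = some (-1) := by
  unfold vget
  cases hr : PySem.List.pyGet? (List.replicate n (List.replicate m (-1 : Int))) y with
  | none =>
    rw [PySem.List.pyGet?_eq_none_iff] at hr
    exact absurd (by simpa [PySem.Raise.InRange] using hy) hr
  | some row =>
    have hrow : row = List.replicate m (-1) :=
      List.eq_of_mem_replicate (PySem.List.mem_of_pyGet?_eq_some _ hr)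
    subst hrow
    simp only
    cases hr2 : PySem.List.pyGet? (List.replicate m (-1 : Int)) x with
    | none =>
      rw [PySem.List.pyGet?_eq_none_iff] at hr2
      exact absurd (by simpa [PySem.Raise.InRange] using hx) hr2
    | some t =>
      have : t = -1 := List.eq_of_mem_replicate (PySem.List.mem_of_pyGet?_eq_some _ hr2)
      rw [this]

-- ===== VERDICT (by name: the statement is the Claim_ definition above) =====
theorem dfs_spec : Claim_equal_dfs := by
  unfold Claim_equal_dfs
  intro h_ w sh sw gh gw c _ hpre
  obtain ⟨hshr, hswr, -⟩ := hpre
  unfold Spec_dfs dfs dfs_alt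
  simp only
  rw [vset_start]
  have hShV : Sh h_ w (List.replicate h_.toNat (List.replicate w.toNat (-1 : Int))) :=
    Sh_replicate h_ w
  have hvgV : vget (List.replicate h_.toNat (List.replicate w.toNat (-1 : Int))) sh sw
      = some (-1) :=
    vget_replicate h_.toNat w.toNat sh sw (by omega) (by omega)
  by_cases hgoal : sh = gh ∧ sw = gw
  · rw [dfsLoop_goal h_ w gh gw c _ 0 sh sw [] hvgV hgoal]
    rw [visit_goal h_ w gh gw c _ 0 (h_.toNat * w.toNat) sh sw hvgV hgoal]
  · rw [dfsLoop_push h_ w gh gw c _ 0 sh sw [] hvgV hgoal]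
    rw [visit_push h_ w gh gw c _ 0 (h_.toNat * w.toNat) sh sw hvgV hgoal]
    have hsok : StepOK h_ w (List.replicate h_.toNat (List.replicate w.toNat (-1 : Int)))
        (vset (List.replicate h_.toNat (List.replicate w.toNat (-1 : Int))) sh sw
          (((0 : Nat) : Int) + 1)) := StepOK_vset hvgV (by omega)
    have hsh' := hsok.1 hShV
    have hcn : countNeg (vset (List.replicate h_.toNat (List.replicate w.toNat (-1 : Int)))
        sh sw (((0 : Nat) : Int) + 1)) < h_.toNat * w.toNat := by
      have := countNeg_vset_lt (List.replicate h_.toNat (List.replicate w.toNat (-1 : Int)))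
        sh sw (((0 : Nat) : Int) + 1) hvgV (by omega)
      rw [countNeg_replicate] at this
      exact this
    rw [stackA]
    rw [main h_ w gh gw c
      (5 * countNeg (vset (List.replicate h_.toNat (List.replicate w.toNat (-1 : Int)))
        sh sw (((0 : Nat) : Int) + 1)) + 4)
      (h_.toNat * w.toNat) [(sh, sw - 1), (sh, sw + 1), (sh - 1, sw), (sh + 1, sw)] []
      _ _ (0 + 1) hsh' hsh' (VExt_rfl _) hcn (by simp [List.length_cons])]
    rcases hres : visitFold h_ w gh gw c (h_.toNat * w.toNat)
        [(sh, sw - 1), (sh, sw + 1), (sh - 1, sw), (sh + 1, sw)]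
        (vset (List.replicate h_.toNat (List.replicate w.toNat (-1 : Int))) sh sw
          (((0 : Nat) : Int) + 1)) (0 + 1) with ⟨r, v₂, n₂⟩
    cases r with
    | some k => simp only
    | none => simp only [dfsLoop_nil]
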